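-- pv_equiv track=rewrite | github.com/vlad-a-c/PlayPalace11 | server/game_utils/poker_payout.py | compute_ordered_payouts
-- ===== SOURCE A (Python) =====
-- from typing import Callable, Iterable, TypeVar
--
-- TPlayer = TypeVar("TPlayer")
--
-- def compute_ordered_payouts(
--     pot_amount: int,
--     ordered_winners: list[TPlayer],
-- ) -> list[tuple[TPlayer, int]]:
--     """Split a pot across already ordered winners.
--
--     Odd chips are awarded one at a time in the supplied order.
--
--     Args:
--         pot_amount: Total chips in the pot.
--         ordered_winners: Winners in odd-chip priority order.
--
--     Returns:
--         List of ``(winner, payout)`` tuples in the same order.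
--     """
--     if pot_amount <= 0 or not ordered_winners:
--         return []
--     share = pot_amount // len(ordered_winners)
--     remainder = pot_amount % len(ordered_winners)
--     payouts: list[tuple[TPlayer, int]] = []
--     for index, winner in enumerate(ordered_winners):
--         payout = share + (1 if index < remainder else 0)
--         payouts.append((winner, payout))
--     return payouts
-- ===== SOURCE B (Python) =====
-- def compute_ordered_payouts(pot_amount, ordered_winners):
--     """Split pot with a running remainder: each payout is the ceiling of the
--     remaining pot over the remaining winner count."""
--     if pot_amount <= 0 or not ordered_winners:
--         return []
--     payouts = []
--     remaining = pot_amount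
--     remaining_count = len(ordered_winners)
--     for winner in ordered_winners:
--         payout = (remaining + remaining_count - 1) // remaining_count
--         payouts.append((winner, payout))
--         remaining -= payout
--         remaining_count -= 1
--     return payouts
-- ===== Notes on version B (the rewrite author's own statement) =====
-- stated objective: alternative
-- what changed: Replaces the precomputed quotient/remainder plus index-vs-remainder test by a running-state loop that pays each winner the ceiling of the remaining pot over the remaining winner count.
import Mathlib
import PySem

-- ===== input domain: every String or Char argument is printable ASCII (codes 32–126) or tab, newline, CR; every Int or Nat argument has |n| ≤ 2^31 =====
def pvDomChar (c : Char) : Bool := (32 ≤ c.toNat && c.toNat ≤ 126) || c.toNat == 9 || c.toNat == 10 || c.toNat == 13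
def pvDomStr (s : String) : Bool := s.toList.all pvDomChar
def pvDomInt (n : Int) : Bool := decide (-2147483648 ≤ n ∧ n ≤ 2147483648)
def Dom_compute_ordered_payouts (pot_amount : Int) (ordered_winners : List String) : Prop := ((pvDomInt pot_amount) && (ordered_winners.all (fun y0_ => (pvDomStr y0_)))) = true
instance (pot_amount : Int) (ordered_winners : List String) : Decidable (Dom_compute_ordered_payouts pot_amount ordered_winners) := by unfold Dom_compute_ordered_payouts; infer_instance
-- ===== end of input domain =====

-- B replaces A's precomputed share/remainder + index test by a running-state loop
-- (remaining pot, remaining count) paying each winner the ceiling share; alternative decomposition, same cost.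

-- ===== PORT A =====
def compute_ordered_payouts (pot_amount : Int) (ordered_winners : List String) : List (String × Int) :=
  if pot_amount ≤ 0 ∨ ordered_winners = [] then []
  else
    let share := PySem.Int.floordiv pot_amount (ordered_winners.length : Int)
    let remainder := PySem.Int.mod pot_amount (ordered_winners.length : Int)
    (PySem.List.enumerate ordered_winners).foldl
      (fun acc iw => acc ++ [(iw.2, share + if iw.1 < remainder then 1 else 0)]) []

-- ===== PORT B =====
-- running-state loop of Source B: remaining pot and remaining count, ceiling division each step
def altLoop (remaining count : Int) : List String → List (String × Int)
  | [] => []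
  | w :: ws =>
    let payout := PySem.Int.floordiv (remaining + count - 1) count
    (w, payout) :: altLoop (remaining - payout) (count - 1) ws

def compute_ordered_payouts_alt (pot_amount : Int) (ordered_winners : List String) : List (String × Int) :=
  if pot_amount ≤ 0 ∨ ordered_winners = [] then []
  else altLoop pot_amount (ordered_winners.length : Int) ordered_winners

-- ===== PRECONDITION & SPEC =====
def Spec_compute_ordered_payouts (pot_amount : Int) (ordered_winners : List String) (out : List (String × Int)) : Prop := out = compute_ordered_payouts_alt pot_amount ordered_winners
instance (pot_amount : Int) (ordered_winners : List String) (out : List (String × Int)) : Decidable (Spec_compute_ordered_payouts pot_amount ordered_winners out) := by unfold Spec_compute_ordered_payouts; infer_instance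

-- ===== CLAIM (what is proved, stated in full; the proofs are below) =====
def Claim_equal_compute_ordered_payouts : Prop := ∀ (pot_amount : Int) (ordered_winners : List String), Dom_compute_ordered_payouts pot_amount ordered_winners → Spec_compute_ordered_payouts pot_amount ordered_winners (compute_ordered_payouts pot_amount ordered_winners)

-- ===== LEMMAS AND PROOFS =====

-- ceiling division arithmetic: one step of B's loop
lemma ceil_step (n s k : Int) (hn : 0 < n) (hk0 : 0 ≤ k) (hkn : k ≤ n) :
    PySem.Int.floordiv (n * s + k + n - 1) n = s + (if 0 < k then 1 else 0) := by
  rw [PySem.Int.floordiv_eq_iff_of_pos hn]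
  split_ifs with h
  · exact ⟨by nlinarith, by nlinarith⟩
  · exact ⟨by nlinarith, by nlinarith⟩

lemma altLoop_eq (ws : List String) : ∀ (s k j : Int), 0 ≤ k → k ≤ (ws.length : Int) →
    altLoop ((ws.length : Int) * s + k) (ws.length : Int) ws =
      (PySem.List.enumerate ws j).map (fun iw => (iw.2, s + if iw.1 < j + k then 1 else 0)) := by
  induction ws with
  | nil => intro s k j _ _; simp [altLoop, PySem.List.enumerate_nil]
  | cons w ws ih =>
    intro s k j hk0 hkn
    have hn : (0 : Int) < ((w :: ws).length : Int) := by exact_mod_cast Nat.succ_pos ws.length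
    simp only [altLoop, PySem.List.enumerate_cons, List.map_cons]
    rw [ceil_step _ s k hn hk0 hkn]
    by_cases hk : 0 < k
    · have hhead : (j < j + k) = True := eq_true (by omega)
      simp only [hk, hhead, if_true]
      have harg : ((w :: ws).length : Int) * s + k - (s + 1) = (ws.length : Int) * s + (k - 1) := by
        simp [List.length_cons]; ring
      have hcnt : ((w :: ws).length : Int) - 1 = (ws.length : Int) := by simp
      rw [harg, hcnt, ih s (k - 1) (j + 1) (by omega) (by simp at hkn ⊢; omega)]
      congr 1
      apply List.map_congr_left
      intro p _
      have heq : j + 1 + (k - 1) = j + k := by omega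
      rw [heq]
    · have hk' : k = 0 := by omega
      subst hk'
      have hhead : ¬ (j < j + 0) := by omega
      simp only [if_neg hk, if_neg hhead]
      have harg : ((w :: ws).length : Int) * s + 0 - (s + 0) = (ws.length : Int) * s + 0 := by
        simp [List.length_cons]; ring
      have hcnt : ((w :: ws).length : Int) - 1 = (ws.length : Int) := by simp
      rw [harg, hcnt, ih s 0 (j + 1) (by omega) (by positivity)]
      congr 1
      apply List.map_congr_left
      intro p hp
      rw [PySem.List.mem_enumerate_iff] at hp
      obtain ⟨m, hm, rfl⟩ := hp
      congr 1
      split_ifs <;> omega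

-- ===== VERDICT (by name: the statement is the Claim_ definition above) =====
theorem compute_ordered_payouts_spec : Claim_equal_compute_ordered_payouts := by
  intro pot ws _
  unfold Spec_compute_ordered_payouts compute_ordered_payouts compute_ordered_payouts_alt
  split_ifs with h
  · rfl
  · push Not at h
    obtain ⟨hpot, hne⟩ := h
    have hn : (0 : Int) < (ws.length : Int) := by
      have := List.length_pos_of_ne_nil hne; exact_mod_cast this
    set n : Int := (ws.length : Int) with hndef
    set share := PySem.Int.floordiv pot n with hs
    set remainder := PySem.Int.mod pot n with hr
    have hdecomp : pot = n * share + remainder := by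
      have := PySem.Int.floordiv_mul_add_mod pot n
      rw [← hs, ← hr] at this; linarith
    have hrb : 0 ≤ remainder ∧ remainder < n := by
      rw [hr, PySem.Int.mod_eq_emod_of_pos hn]
      exact ⟨Int.emod_nonneg _ (by omega), Int.emod_lt_of_pos _ hn⟩
    rw [PySem.List.foldl_append_singleton_eq_map, List.nil_append]
    rw [hdecomp, altLoop_eq ws share remainder 0 hrb.1 (by omega)]
    simp
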